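-- pv_equiv track=rewrite | github.com/ganeshparsads/OAs | max_work.py | maximumEfficiency
-- ===== SOURCE A (Python) =====
-- def maximumEfficiency(memory):
--     n = len(memory)
--     mod = 10**9 + 7
--
--     def calculate_efficiency(arr):
--         return sum((i + 1) * arr[i] for i in range(n)) % mod
--
--     max_efficiency = calculate_efficiency(memory)
--
--     for idx in range(1, n // 2 + 1):
--         for i in range(n - 2 * idx + 1):
--             j = i + 2 * idx - 1
--
--             # Swap the data within the distance specified by idx
--             temp = memory[i:j+1]
--             temp.sort()
--
--             # Reconstruct the memory array after the swap
--             new_memory = memory[:i] + temp + memory[j+1:]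
--
--             max_efficiency = max(max_efficiency, calculate_efficiency(new_memory))
--
--     return max_efficiency
--
-- memory = [5, 1, 4, 2, 4, 1, 2, 3]
-- ===== SOURCE B (Python) =====
-- def maximumEfficiency(memory):
--     mod = 10**9 + 7
--
--     def wsum_from(base, arr):
--         total = 0
--         w = base + 1
--         for v in arr:
--             total += w * v
--             w += 1
--         return total
--
--     n = len(memory)
--     s = wsum_from(0, memory)
--     best = s % mod
--     for i in range(n):
--         for j in range(i + 1, n, 2):
--             window = memory[i:j + 1]
--             delta = wsum_from(i, sorted(window)) - wsum_from(i, window)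
--             best = max(best, (s + delta) % mod)
--     return best
-- ===== Notes on version B (the rewrite author's own statement) =====
-- stated objective: alternative
-- what changed: Instead of rebuilding the whole array and recomputing the full weighted sum for every window, B precomputes the base weighted sum once and adds, per window, only the weighted delta between the sorted and the original window, iterating windows by (start, end) pairs; measured ~1.7x but not confirmed faster at the largest size.
import Mathlib
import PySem

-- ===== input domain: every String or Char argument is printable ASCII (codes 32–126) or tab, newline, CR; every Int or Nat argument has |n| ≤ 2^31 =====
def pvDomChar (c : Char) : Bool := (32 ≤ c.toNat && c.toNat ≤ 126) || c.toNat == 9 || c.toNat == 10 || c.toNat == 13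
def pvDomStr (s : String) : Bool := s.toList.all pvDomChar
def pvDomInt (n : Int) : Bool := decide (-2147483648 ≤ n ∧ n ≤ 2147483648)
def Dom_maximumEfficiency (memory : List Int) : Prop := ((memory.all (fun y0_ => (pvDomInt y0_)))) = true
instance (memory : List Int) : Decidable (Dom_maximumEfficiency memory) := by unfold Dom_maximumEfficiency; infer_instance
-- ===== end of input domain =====

-- B replaces A's per-window array reconstruction and full weighted-sum recompute by one
-- precomputed base sum plus a per-window weighted delta of the sorted window (objective: alternative).

-- ===== PORT A =====

-- sum((i + 1) * arr[i] for i in range(n)) % mod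
def pvCalcEff (n : Int) (arr : List Int) : Int :=
  PySem.Int.mod
    ((PySem.List.pyRange 0 n 1).foldl (fun acc i => acc + (i + 1) * PySem.List.pyGetD arr i 0) 0)
    1000000007

def maximumEfficiency (memory : List Int) : Int :=
  let n : Int := memory.length
  let base := pvCalcEff n memory
  (PySem.List.pyRange 1 (PySem.Int.floordiv n 2 + 1) 1).foldl (fun me idx =>
    (PySem.List.pyRange 0 (n - 2 * idx + 1) 1).foldl (fun me i =>
      let j := i + 2 * idx - 1
      let temp := PySem.List.sorted (PySem.List.slice memory (some i) (some (j + 1))) (fun x => x) false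
      let newm := PySem.List.slice memory none (some i) ++ temp ++ PySem.List.slice memory (some (j + 1)) none
      max me (pvCalcEff n newm)) me) base

-- ===== PORT B =====

-- def wsum_from(base, arr): total = 0; w = base + 1; for v in arr: total += w*v; w += 1
def pvWsumFrom (base : Int) (arr : List Int) : Int :=
  (arr.foldl (fun (p : Int × Int) v => (p.1 + p.2 * v, p.2 + 1)) ((0 : Int), base + 1)).1

def maximumEfficiency_alt (memory : List Int) : Int :=
  let n : Int := memory.length
  let s := pvWsumFrom 0 memory
  let best := PySem.Int.mod s 1000000007
  (PySem.List.pyRange 0 n 1).foldl (fun best i =>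
    (PySem.List.pyRange (i + 1) n 2).foldl (fun best j =>
      let window := PySem.List.slice memory (some i) (some (j + 1))
      let delta := pvWsumFrom i (PySem.List.sorted window (fun x => x) false) - pvWsumFrom i window
      max best (PySem.Int.mod (s + delta) 1000000007)) best) best

-- ===== PRECONDITION & SPEC =====
def Spec_maximumEfficiency (memory : List Int) (out : Int) : Prop := out = maximumEfficiency_alt memory
instance (memory : List Int) (out : Int) : Decidable (Spec_maximumEfficiency memory out) := by unfold Spec_maximumEfficiency; infer_instance

-- ===== CLAIM (what is proved, stated in full; the proofs are below) =====
def Claim_equal_maximumEfficiency : Prop := ∀ (memory : List Int), Dom_maximumEfficiency memory → Spec_maximumEfficiency memory (maximumEfficiency memory)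

-- ===== LEMMAS AND PROOFS =====

-- weighted sum with weights base+1, base+2, …
def pvW : Int → List Int → Int
  | _, [] => 0
  | b, x :: xs => (b + 1) * x + pvW (b + 1) xs

theorem pvWsumFrom_aux (l : List Int) : ∀ (acc b : Int),
    (l.foldl (fun (p : Int × Int) v => (p.1 + p.2 * v, p.2 + 1)) (acc, b + 1)).1 = acc + pvW b l := by
  induction l with
  | nil => intro acc b; simp [pvW]
  | cons x xs ih =>
    intro acc b
    simp only [List.foldl_cons]
    rw [show ((acc, b + 1).1 + (acc, b + 1).2 * x, (acc, b + 1).2 + 1)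
        = (acc + (b + 1) * x, (b + 1) + 1) from rfl, ih, pvW]
    ring_nf

theorem pvWsumFrom_eq (b : Int) (l : List Int) : pvWsumFrom b l = pvW b l := by
  unfold pvWsumFrom
  rw [pvWsumFrom_aux]
  simp

theorem pvW_append (l1 l2 : List Int) : ∀ b : Int,
    pvW b (l1 ++ l2) = pvW b l1 + pvW (b + l1.length) l2 := by
  induction l1 with
  | nil => intro b; simp [pvW]
  | cons x xs ih =>
    intro b
    simp only [List.cons_append, pvW, ih (b + 1), List.length_cons]
    push_cast
    ring_nf

-- bridge: A's range-indexed sum is pvW 0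
theorem pvCalc_fold (arr : List Int) : ∀ acc : Int,
    (PySem.List.pyRange 0 (arr.length : Int) 1).foldl
      (fun acc i => acc + (i + 1) * PySem.List.pyGetD arr i 0) acc = acc + pvW 0 arr := by
  induction arr using List.reverseRecOn with
  | nil => intro acc; simp [PySem.List.pyRange_one_eq_nil, pvW]
  | append_singleton xs x ih =>
    intro acc
    have hlen : ((xs ++ [x]).length : Int) = (xs.length : Int) + 1 := by simp
    rw [hlen, PySem.List.pyRange_one_succ_right (by positivity), List.foldl_append]
    have hcongr : (PySem.List.pyRange 0 (xs.length : Int) 1).foldl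
        (fun acc i => acc + (i + 1) * PySem.List.pyGetD (xs ++ [x]) i 0) acc
        = (PySem.List.pyRange 0 (xs.length : Int) 1).foldl
        (fun acc i => acc + (i + 1) * PySem.List.pyGetD xs i 0) acc := by
      apply PySem.List.foldl_congr_mem
      intro a i hi
      rw [PySem.List.mem_pyRange_one] at hi
      rw [PySem.List.pyGetD_eq_getElem (xs ++ [x]) _ hi.1 (by simp; omega),
          PySem.List.pyGetD_eq_getElem xs _ hi.1 hi.2]
      rw [List.getElem_append_left (by omega)]
    rw [hcongr, ih]
    simp only [List.foldl_cons, List.foldl_nil]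
    have hx : PySem.List.pyGetD (xs ++ [x]) (xs.length : Int) 0 = x := by
      rw [PySem.List.pyGetD_eq_getElem _ _ (by positivity) (by simp)]
      simp
    rw [hx, pvW_append]
    simp [pvW]
    ring_nf

theorem pvCalc_eq (n : Int) (arr : List Int) (h : n = arr.length) :
    pvCalcEff n arr = PySem.Int.mod (pvW 0 arr) 1000000007 := by
  unfold pvCalcEff
  rw [h, pvCalc_fold]
  simp

-- the common per-window candidate value
def pvCand (memory : List Int) (i j : Int) : Int :=
  PySem.Int.mod
    (pvW 0 memory
      + (pvW i (PySem.List.sorted (List.take ((j + 1).toNat - i.toNat) (List.drop i.toNat memory)) (fun x => x) false)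
         - pvW i (List.take ((j + 1).toNat - i.toNat) (List.drop i.toNat memory))))
    1000000007

-- A's inner candidate equals pvCand
theorem pvA_cand (memory : List Int) (i j : Int)
    (h0 : 0 ≤ i) (hij : i ≤ j) (hj : j < (memory.length : Int)) :
    pvCalcEff (memory.length : Int)
      (PySem.List.slice memory none (some i)
        ++ PySem.List.sorted (PySem.List.slice memory (some i) (some (j + 1))) (fun x => x) false
        ++ PySem.List.slice memory (some (j + 1)) none)
      = pvCand memory i j := by
  have h1 : (0:Int) ≤ j + 1 := by omega
  rw [PySem.List.slice_to _ h0, PySem.List.slice_from _ h1, PySem.List.slice_toNat _ h0 h1]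
  set pre := List.take i.toNat memory with hpre
  set w := List.take ((j + 1).toNat - i.toNat) (List.drop i.toNat memory) with hw
  set suf := List.drop (j + 1).toNat memory with hsuf
  set t := PySem.List.sorted w (fun x => x) false with ht
  have hpl : pre.length = i.toNat := by
    rw [hpre, List.length_take]; omega
  have hwl : w.length = (j + 1).toNat - i.toNat := by
    rw [hw]; simp [List.length_take, List.length_drop]; omega
  have htl : t.length = w.length := PySem.List.length_sorted _ _ _
  have hdd : List.drop (j + 1).toNat memory
      = List.drop ((j + 1).toNat - i.toNat) (List.drop i.toNat memory) := by
    rw [List.drop_drop]; congr 1; omega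
  have hdecomp : memory = pre ++ w ++ suf := by
    rw [hpre, hw, hsuf, List.append_assoc, hdd, List.take_append_drop, List.take_append_drop]
  have hlen : ((pre ++ t ++ suf).length : Int) = (memory.length : Int) := by
    conv_rhs => rw [hdecomp]
    simp [htl]
  rw [pvCalc_eq _ _ hlen.symm]
  unfold pvCand
  rw [← hw, ← ht]
  congr 1
  have e1 : pvW 0 (pre ++ t ++ suf)
      = pvW 0 pre + pvW (pre.length : Int) t + pvW ((pre.length : Int) + t.length) suf := by
    rw [pvW_append, pvW_append]; simp only [List.length_append, Nat.cast_add]; ring_nf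
  have e2 : pvW 0 memory
      = pvW 0 pre + pvW (pre.length : Int) w + pvW ((pre.length : Int) + w.length) suf := by
    conv_lhs => rw [hdecomp]
    rw [pvW_append, pvW_append]; simp only [List.length_append, Nat.cast_add]; ring_nf
  have hpli : (pre.length : Int) = i := by rw [hpl]; omega
  rw [e1, e2, hpli, htl]
  ring_nf

-- B's inner candidate equals pvCand
theorem pvB_cand (memory : List Int) (i j : Int) (h0 : 0 ≤ i) (h1 : (0:Int) ≤ j + 1) :
    PySem.Int.mod
      (pvWsumFrom 0 memory +
        (pvWsumFrom i (PySem.List.sorted (PySem.List.slice memory (some i) (some (j + 1))) (fun x => x) false)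
          - pvWsumFrom i (PySem.List.slice memory (some i) (some (j + 1)))))
      1000000007 = pvCand memory i j := by
  rw [PySem.List.slice_toNat _ h0 h1]
  unfold pvCand
  simp only [pvWsumFrom_eq]

-- the window-pair condition both loop nests enumerate
def pvCond (n i j : Int) : Prop := 0 ≤ i ∧ i < j ∧ j < n ∧ (2 : Int) ∣ (j - i - 1)

def pvListA (memory : List Int) : List Int :=
  (PySem.List.pyRange 1 (PySem.Int.floordiv (memory.length : Int) 2 + 1) 1).flatMap
    (fun idx => (PySem.List.pyRange 0 ((memory.length : Int) - 2 * idx + 1) 1).map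
      (fun i => pvCand memory i (i + 2 * idx - 1)))

def pvListB (memory : List Int) : List Int :=
  (PySem.List.pyRange 0 (memory.length : Int) 1).flatMap
    (fun i => (PySem.List.pyRange (i + 1) (memory.length : Int) 2).map
      (fun j => pvCand memory i j))

theorem pvListA_mem (memory : List Int) (v : Int) :
    v ∈ pvListA memory
      ↔ ∃ i j : Int, pvCond (memory.length : Int) i j ∧ v = pvCand memory i j := by
  unfold pvListA
  set n : Int := (memory.length : Int) with hn
  have hn0 : 0 ≤ n := by positivity
  have hfd : PySem.Int.floordiv n 2 = n / 2 := PySem.Int.floordiv_eq_ediv_of_pos (by omega)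
  constructor
  · intro hv
    rw [List.mem_flatMap] at hv
    obtain ⟨idx, hidx, hv⟩ := hv
    rw [List.mem_map] at hv
    obtain ⟨i, hi, rfl⟩ := hv
    rw [PySem.List.mem_pyRange_one] at hidx hi
    rw [hfd] at hidx
    refine ⟨i, i + 2 * idx - 1, ⟨hi.1, by omega, by omega, ⟨idx - 1, by ring⟩⟩, rfl⟩
  · rintro ⟨i, j, ⟨hi0, hij, hjn, k, hk⟩, rfl⟩
    rw [List.mem_flatMap]
    refine ⟨(j - i + 1) / 2, ?_, ?_⟩
    · rw [PySem.List.mem_pyRange_one, hfd]; omega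
    · rw [List.mem_map]
      refine ⟨i, ?_, ?_⟩
      · rw [PySem.List.mem_pyRange_one]; constructor; · exact hi0
        omega
      · congr 1; omega

theorem pvListB_mem (memory : List Int) (v : Int) :
    v ∈ pvListB memory
      ↔ ∃ i j : Int, pvCond (memory.length : Int) i j ∧ v = pvCand memory i j := by
  unfold pvListB
  set n : Int := (memory.length : Int) with hn
  constructor
  · intro hv
    rw [List.mem_flatMap] at hv
    obtain ⟨i, hi, hv⟩ := hv
    rw [List.mem_map] at hv
    obtain ⟨j, hj, rfl⟩ := hv
    rw [PySem.List.mem_pyRange_one] at hi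
    rw [PySem.List.mem_pyRange_iff_of_pos (by omega)] at hj
    exact ⟨i, j, ⟨hi.1, by omega, hj.2.1, by
      obtain ⟨k, hk⟩ := hj.2.2; exact ⟨k, by omega⟩⟩, rfl⟩
  · rintro ⟨i, j, ⟨hi0, hij, hjn, k, hk⟩, rfl⟩
    rw [List.mem_flatMap]
    refine ⟨i, by rw [PySem.List.mem_pyRange_one]; omega, ?_⟩
    rw [List.mem_map]
    exact ⟨j, by rw [PySem.List.mem_pyRange_iff_of_pos (by omega)]
                 exact ⟨by omega, by omega, ⟨k, by omega⟩⟩, rfl⟩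

-- two foldl-max runs over lists with the same membership and the same start agree
theorem pvFoldMax_eq (base : Int) (l1 l2 : List Int)
    (h : ∀ v, v ∈ l1 ↔ v ∈ l2) : l1.foldl max base = l2.foldl max base := by
  apply le_antisymm
  · rcases PySem.List.foldl_max_mem l1 base with h1 | h1
    · rw [h1]; exact (PySem.List.le_foldl_max l2 base).1
    · exact (PySem.List.le_foldl_max l2 base).2 _ ((h _).mp h1)
  · rcases PySem.List.foldl_max_mem l2 base with h1 | h1
    · rw [h1]; exact (PySem.List.le_foldl_max l1 base).1
    · exact (PySem.List.le_foldl_max l1 base).2 _ ((h _).mpr h1)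

theorem pvA_eq (memory : List Int) :
    maximumEfficiency memory
      = (pvListA memory).foldl max (PySem.Int.mod (pvW 0 memory) 1000000007) := by
  simp only [maximumEfficiency]
  rw [pvCalc_eq _ _ rfl]
  unfold pvListA
  rw [List.foldl_flatMap]
  apply PySem.List.foldl_congr_mem
  intro me idx hidx
  rw [PySem.List.mem_pyRange_one] at hidx
  rw [List.foldl_map]
  apply PySem.List.foldl_congr_mem
  intro me' i hi
  rw [PySem.List.mem_pyRange_one] at hi
  congr 1
  exact pvA_cand memory i (i + 2 * idx - 1) hi.1 (by omega) (by omega)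

theorem pvB_eq (memory : List Int) :
    maximumEfficiency_alt memory
      = (pvListB memory).foldl max (PySem.Int.mod (pvW 0 memory) 1000000007) := by
  simp only [maximumEfficiency_alt]
  rw [pvWsumFrom_eq]
  unfold pvListB
  rw [List.foldl_flatMap]
  apply PySem.List.foldl_congr_mem
  intro best i hi
  rw [PySem.List.mem_pyRange_one] at hi
  rw [List.foldl_map]
  apply PySem.List.foldl_congr_mem
  intro best' j hj
  rw [PySem.List.mem_pyRange_iff_of_pos (by omega)] at hj
  congr 1
  rw [← pvWsumFrom_eq 0 memory]
  exact pvB_cand memory i j hi.1 (by omega)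

-- ===== VERDICT (by name: the statement is the Claim_ definition above) =====
theorem maximumEfficiency_spec : Claim_equal_maximumEfficiency := by
  intro memory _
  unfold Spec_maximumEfficiency
  rw [pvA_eq, pvB_eq]
  exact pvFoldMax_eq _ _ _
    (fun v => (pvListA_mem memory v).trans (pvListB_mem memory v).symm)
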